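-- pv_equiv track=rewrite | github.com/stetelepta/opensanctions | zavod/zavod/exporters/securities.py | join_cell
-- ===== SOURCE A (Python) =====
-- from typing import Set, Iterable
--
-- def join_cell(texts: Iterable[str], sep: str = ";") -> str:
--     values: Set[str] = set()
--     for value in texts:
--         if value is None:
--             continue
--         value = value.strip().replace(sep, ",")
--         if len(value) == 0:
--             continue
--         values.add(value)
--     return sep.join(sorted(values))
-- ===== SOURCE B (Python) =====
-- def join_cell(texts, sep=";"):
--     # One pass maintaining a sorted, duplicate-free list by ordered insertion
--     # (hand-written binary search for the position): no set and no sort call.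
--     uniq = []
--     for value in texts:
--         if value is None:
--             continue
--         v = value.strip().replace(sep, ",")
--         if not v:
--             continue
--         lo, hi = 0, len(uniq)
--         while lo < hi:
--             mid = (lo + hi) // 2
--             if uniq[mid] < v:
--                 lo = mid + 1
--             else:
--                 hi = mid
--         if lo == len(uniq) or uniq[lo] != v:
--             uniq.insert(lo, v)
--     return sep.join(uniq)
-- ===== Notes on version B (the rewrite author's own statement) =====
-- stated objective: alternative
-- what changed: Replaces A's set-accumulation followed by a global sorted() with a single pass whose only state is a sorted duplicate-free list: each cleaned value's position is found by a hand-written binary search and it is inserted there unless already present, and that list is joined directly, so no set and no sort call exist.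
import Mathlib
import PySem

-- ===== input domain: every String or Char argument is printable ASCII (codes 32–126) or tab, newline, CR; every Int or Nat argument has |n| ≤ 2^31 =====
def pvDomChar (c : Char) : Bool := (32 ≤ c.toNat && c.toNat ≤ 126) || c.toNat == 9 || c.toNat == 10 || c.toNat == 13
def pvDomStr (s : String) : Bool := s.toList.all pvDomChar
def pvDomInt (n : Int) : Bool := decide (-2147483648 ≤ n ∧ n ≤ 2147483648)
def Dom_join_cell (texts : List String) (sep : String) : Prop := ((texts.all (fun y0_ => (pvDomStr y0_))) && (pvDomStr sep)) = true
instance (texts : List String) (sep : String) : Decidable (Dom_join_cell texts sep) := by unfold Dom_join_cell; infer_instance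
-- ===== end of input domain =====

-- B replaces A's set-then-sorted() pipeline by one pass maintaining a sorted duplicate-free list via binary-search ordered insertion (alternative decomposition).

-- ===== PORT A =====
def join_cell (texts : List String) (sep : String) : String :=
  let values : PySem.Set String :=
    texts.foldl (fun values value =>
      let v := PySem.Str.replace (PySem.Str.strip value) sep ","
      if PySem.Str.len v = 0 then values else PySem.Set.add values v) PySem.Set.empty
  PySem.Str.join sep (PySem.List.sorted values (fun x => x) false)

-- ===== PORT B =====
/-- Source B's hand-written binary-search while-loop: `while lo < hi: mid=(lo+hi)//2; …`
    (indices are nonnegative throughout, so Nat `/` matches Python's `//`). -/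
def pvBisect (uniq : List String) (v : String) (lo hi : Nat) : Nat :=
  if lo < hi then
    let mid := (lo + hi) / 2
    if PySem.List.pyGetD uniq (mid : Int) "" < v then pvBisect uniq v (mid + 1) hi
    else pvBisect uniq v lo mid
  else lo
termination_by hi - lo
decreasing_by all_goals omega

def join_cell_alt (texts : List String) (sep : String) : String :=
  let uniq : List String :=
    texts.foldl (fun uniq value =>
      let v := PySem.Str.replace (PySem.Str.strip value) sep ","
      if v ≠ "" then
        let lo := pvBisect uniq v 0 uniq.length
        if lo = uniq.length ∨ ¬ (PySem.List.pyGetD uniq (lo : Int) "" = v) then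
          PySem.List.insert uniq (lo : Int) v
        else uniq
      else uniq) []
  PySem.Str.join sep uniq

-- ===== PRECONDITION & SPEC =====
def Spec_join_cell (texts : List String) (sep : String) (out : String) : Prop := out = join_cell_alt texts sep
instance (texts : List String) (sep : String) (out : String) : Decidable (Spec_join_cell texts sep out) := by unfold Spec_join_cell; infer_instance

-- ===== CLAIM (what is proved, stated in full; the proofs are below) =====
def Claim_equal_join_cell : Prop := ∀ (texts : List String) (sep : String), Dom_join_cell texts sep → Spec_join_cell texts sep (join_cell texts sep)

-- ===== LEMMAS AND PROOFS =====

/-- The list of cleaned, non-empty values, in input order (shared characterisation of both folds). -/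
def pvClean (sep : String) (texts : List String) : List String :=
  texts.filterMap (fun value =>
    let v := PySem.Str.replace (PySem.Str.strip value) sep ","
    if v = "" then none else some v)

/-- Reference ordered-insert (proof-side): what one step of B does to a strictly sorted list. -/
def pvInsert (uniq : List String) (v : String) : List String :=
  match uniq with
  | [] => [v]
  | h :: t => if h < v then h :: pvInsert t v else if h = v then h :: t else v :: h :: t

/-- One step of B's loop body on the accumulator (cleaning factored out). -/
def pvStep (uniq : List String) (v : String) : List String :=
  let lo := pvBisect uniq v 0 uniq.length
  if lo = uniq.length ∨ ¬ (PySem.List.pyGetD uniq (lo : Int) "" = v) then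
    PySem.List.insert uniq (lo : Int) v
  else uniq

theorem pvLenZero (v : String) : (PySem.Str.len v = 0) ↔ v = "" := by
  simp [PySem.Str.len]

theorem pvFoldA (sep : String) (texts : List String) (s : PySem.Set String) :
    texts.foldl (fun values value =>
      let v := PySem.Str.replace (PySem.Str.strip value) sep ","
      if PySem.Str.len v = 0 then values else PySem.Set.add values v) s
    = (pvClean sep texts).foldl PySem.Set.add s := by
  induction texts generalizing s with
  | nil => simp [pvClean]
  | cons h t ih =>
    rw [List.foldl_cons, ih]
    by_cases hc : PySem.Str.replace (PySem.Str.strip h) sep "," = ""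
    · simp [pvClean, hc]
    · have hc' : PySem.Chars.replace (PySem.Chars.strip h.toList) sep.toList [','] ≠ [] := by
        intro h0
        apply hc
        have h2 : PySem.Str.len (PySem.Str.replace (PySem.Str.strip h) sep ",") = 0 := by
          simp [PySem.Str.len, h0]
        exact (pvLenZero _).1 h2
      simp [pvClean, hc, hc']

theorem pvFoldB (sep : String) (texts : List String) (l : List String) :
    texts.foldl (fun uniq value =>
      let v := PySem.Str.replace (PySem.Str.strip value) sep ","
      if v ≠ "" then
        let lo := pvBisect uniq v 0 uniq.length
        if lo = uniq.length ∨ ¬ (PySem.List.pyGetD uniq (lo : Int) "" = v) then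
          PySem.List.insert uniq (lo : Int) v
        else uniq
      else uniq) l
    = (pvClean sep texts).foldl pvStep l := by
  induction texts generalizing l with
  | nil => simp [pvClean]
  | cons h t ih =>
    rw [List.foldl_cons, ih]
    by_cases hc : PySem.Str.replace (PySem.Str.strip h) sep "," = ""
    · simp [pvClean, hc]
    · simp [pvClean, pvStep, hc]

/-- Correctness of the binary search: with valid bounds and the loop invariants,
    the result partitions the strictly sorted list at the leftmost position for `v`. -/
theorem pvBisect_spec (l : List String) (v : String)
    (hsort : ∀ (p q : Nat) (hp : p < l.length) (hq : q < l.length), p < q → l[p] < l[q]) :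
    ∀ (lo hi : Nat), hi ≤ l.length → lo ≤ hi →
    (∀ j (hj : j < l.length), j < lo → l[j] < v) →
    (∀ j (hj : j < l.length), hi ≤ j → v ≤ l[j]) →
    pvBisect l v lo hi ≤ l.length ∧
    (∀ j (hj : j < l.length), j < pvBisect l v lo hi → l[j] < v) ∧
    (∀ j (hj : j < l.length), pvBisect l v lo hi ≤ j → v ≤ l[j]) := by
  intro lo hi
  induction lo, hi using pvBisect.induct l v with
  | case1 lo hi hlt mid hcmp ih =>
    intro hhi hlohi hbelow habove
    have hm : mid = (lo + hi) / 2 := rfl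
    have hmlt : mid < l.length := by omega
    have hmv : l[mid] < v := by
      have h := hcmp
      rwa [PySem.List.pyGetD_natCast, List.getD_eq_getElem l "" hmlt] at h
    have hrw : pvBisect l v lo hi = pvBisect l v (mid + 1) hi := by
      rw [pvBisect, if_pos hlt]
      exact if_pos hcmp
    rw [hrw]
    refine ih hhi (by omega) ?_ habove
    intro j hj hjm
    by_cases hjm' : j < mid
    · exact lt_trans (hsort j mid hj hmlt hjm') hmv
    · have : j = mid := by omega
      subst this; exact hmv
  | case2 lo hi hlt mid hcmp ih =>
    intro hhi hlohi hbelow habove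
    have hm : mid = (lo + hi) / 2 := rfl
    have hmlt : mid < l.length := by omega
    have hmv : v ≤ l[mid] := by
      have h := not_lt.1 hcmp
      rwa [PySem.List.pyGetD_natCast, List.getD_eq_getElem l "" hmlt] at h
    have hrw : pvBisect l v lo hi = pvBisect l v lo mid := by
      rw [pvBisect, if_pos hlt]
      exact if_neg hcmp
    rw [hrw]
    refine ih (by omega) (by omega) hbelow ?_
    intro j hj hjm
    by_cases hjm' : mid < j
    · exact le_of_lt (lt_of_le_of_lt hmv (hsort mid j hmlt hj hjm'))
    · have : j = mid := by omega
      subst this; exact hmv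
  | case3 lo hi hnlt =>
    intro hhi hlohi hbelow habove
    rw [show pvBisect l v lo hi = lo from by rw [pvBisect, if_neg hnlt]]
    have : lo = hi := by omega
    subst this
    exact ⟨by omega, hbelow, habove⟩

/-- `pvInsert` on a strictly sorted list, described by any valid partition point. -/
theorem pvInsert_eq (l : List String) (v : String) (i : Nat) (hi : i ≤ l.length)
    (h1 : ∀ j (hj : j < l.length), j < i → l[j] < v)
    (h2 : ∀ j (hj : j < l.length), i ≤ j → v ≤ l[j]) :
    pvInsert l v = if i < l.length ∧ l.getD i "" = v then l
      else l.take i ++ v :: l.drop i := by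
  induction l generalizing i with
  | nil =>
    have : i = 0 := by simpa using hi
    subst this
    simp [pvInsert]
  | cons h t ih =>
    cases i with
    | zero =>
      have hvh : v ≤ h := h2 0 (by simp) (by omega)
      by_cases he : h = v
      · subst he
        simp [pvInsert]
      · have hlt : v < h := lt_of_le_of_ne hvh (fun e => he e.symm)
        have h1' : ¬ h < v := not_lt.2 (le_of_lt hlt)
        simp [pvInsert, h1', he]
    | succ k =>
      have hh : h < v := h1 0 (by simp) (by omega)
      have e : pvInsert (h :: t) v = h :: pvInsert t v := by
        simp only [pvInsert]; rw [if_pos hh]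
      rw [e, ih k (by simpa using hi)
        (fun j hj hjk => by simpa using h1 (j+1) (by simpa using hj) (by omega))
        (fun j hj hjk => by simpa using h2 (j+1) (by simpa using hj) (by omega))]
      by_cases hc : k < t.length ∧ t.getD k "" = v
      · rw [if_pos hc, if_pos (by simpa [List.getD_cons_succ] using hc)]
      · rw [if_neg hc, if_neg (by simpa [List.getD_cons_succ] using hc)]
        simp

/-- One step of B equals the reference ordered-insert on a strictly sorted accumulator. -/
theorem pvStep_eq (l : List String) (hl : l.Pairwise (· < ·)) (v : String) :
    pvStep l v = pvInsert l v := by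
  have hsort : ∀ (p q : Nat) (hp : p < l.length) (hq : q < l.length), p < q → l[p] < l[q] :=
    fun p q hp hq hpq => List.pairwise_iff_getElem.1 hl p q hp hq hpq
  obtain ⟨hle, hbelow, habove⟩ := pvBisect_spec l v hsort 0 l.length le_rfl (by omega)
    (fun j hj hj0 => absurd hj0 (by omega)) (fun j hj hj0 => absurd hj0 (by omega))
  set i := pvBisect l v 0 l.length with hidef
  rw [pvInsert_eq l v i hle hbelow habove]
  unfold pvStep
  rw [← hidef]
  by_cases hc : i < l.length ∧ l.getD i "" = v
  · rw [if_pos hc, if_neg]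
    simp only [not_or, not_not]
    exact ⟨by omega, by rw [PySem.List.pyGetD_natCast]; exact hc.2⟩
  · rw [if_neg hc, if_pos, PySem.List.insert_natCast l i v hle]
    by_cases hi : i = l.length
    · exact Or.inl hi
    · refine Or.inr ?_
      rw [PySem.List.pyGetD_natCast]
      exact fun e => hc ⟨by omega, e⟩

/-- `pvInsert` preserves strict sortedness and adds exactly `v` to the members. -/
theorem pvInsert_spec (l : List String) (hl : l.Pairwise (· < ·)) (v : String) :
    (pvInsert l v).Pairwise (· < ·) ∧ (∀ x, x ∈ pvInsert l v ↔ x = v ∨ x ∈ l) := by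
  induction l with
  | nil => simp [pvInsert]
  | cons h t ih =>
    rcases List.pairwise_cons.1 hl with ⟨hh, ht⟩
    obtain ⟨ih1, ih2⟩ := ih ht
    by_cases h1 : h < v
    · have e : pvInsert (h :: t) v = h :: pvInsert t v := by
        simp only [pvInsert]; rw [if_pos h1]
      rw [e]
      constructor
      · refine List.pairwise_cons.2 ⟨?_, ih1⟩
        intro y hy
        rcases (ih2 y).1 hy with rfl | hy
        · exact h1
        · exact hh y hy
      · intro x
        simp only [List.mem_cons, ih2 x]
        tauto
    · by_cases h2 : h = v
      · have e : pvInsert (h :: t) v = h :: t := by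
          simp only [pvInsert]; rw [if_neg h1, if_pos h2]
        rw [e]
        refine ⟨hl, fun x => ⟨fun hx => Or.inr hx, fun hx => ?_⟩⟩
        rcases hx with rfl | hx
        · exact h2 ▸ List.mem_cons_self ..
        · exact hx
      · have hvh : v < h := lt_of_le_of_ne (not_lt.1 h1) (Ne.symm h2)
        have e : pvInsert (h :: t) v = v :: h :: t := by
          simp only [pvInsert]; rw [if_neg h1, if_neg h2]
        rw [e]
        constructor
        · refine List.pairwise_cons.2 ⟨?_, hl⟩
          intro y hy
          rcases List.mem_cons.1 hy with rfl | hy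
          · exact hvh
          · exact lt_trans hvh (hh y hy)
        · intro x
          simp only [List.mem_cons]

/-- Folding B's step over any list from a strictly sorted accumulator. -/
theorem pvFoldInsert (c : List String) (l : List String) (hl : l.Pairwise (· < ·)) :
    c.foldl pvStep l = c.foldl pvInsert l ∧
    (c.foldl pvInsert l).Pairwise (· < ·) ∧
    (∀ x, x ∈ c.foldl pvInsert l ↔ x ∈ l ∨ x ∈ c) := by
  induction c generalizing l with
  | nil => exact ⟨rfl, hl, fun x => by simp⟩
  | cons v t ih =>
    obtain ⟨h1, h2⟩ := pvInsert_spec l hl v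
    obtain ⟨ihe, ih1, ih2⟩ := ih (pvInsert l v) h1
    refine ⟨?_, ih1, fun x => ?_⟩
    · rw [List.foldl_cons, List.foldl_cons, pvStep_eq l hl v, ihe]
    · rw [List.foldl_cons, ih2 x, h2 x]
      simp only [List.mem_cons]
      tauto

theorem pvMain (c : List String) :
    PySem.List.sorted (PySem.Set.ofList c) (fun x => x) false = c.foldl pvStep [] := by
  obtain ⟨he, h1, h2⟩ := pvFoldInsert c [] (by simp)
  rw [he]
  apply PySem.List.sorted_eq_of_perm_of_pairwise_lt
  · have hnd1 : (c.foldl pvInsert []).Nodup := h1.imp (fun h => ne_of_lt h)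
    have hnd2 : (PySem.Set.ofList c).Nodup := PySem.Set.nodup_ofList c
    refine (List.perm_ext_iff_of_nodup hnd1 hnd2).2 ?_
    intro x
    rw [h2 x, PySem.Set.mem_ofList]
    simp
  · simpa using h1

-- ===== VERDICT (by name: the statement is the Claim_ definition above) =====
theorem join_cell_spec : Claim_equal_join_cell := by
  intro texts sep _
  unfold Spec_join_cell join_cell join_cell_alt
  simp only [pvFoldA, pvFoldB]
  rw [show List.foldl PySem.Set.add PySem.Set.empty (pvClean sep texts)
      = PySem.Set.ofList (pvClean sep texts) from (PySem.Set.ofList_eq_foldl _).symm, pvMain]
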